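-- pv_equiv track=rewrite | github.com/manuelemergenteanalytics/climate_tech_report_2025 | scripts/market_radar_theme.py | _normalize_industry_key
-- ===== SOURCE A (Python) =====
-- import unicodedata
--
-- def _normalize_industry_key(value: str) -> str:
--     normalized = unicodedata.normalize("NFKD", value)
--     ascii_value = "".join(c for c in normalized if not unicodedata.combining(c))
--     ascii_value = ascii_value.lower()
--     for ch in ["&", "/", "-", ",", ".", "·", ":", ";"]:
--         ascii_value = ascii_value.replace(ch, " ")
--     ascii_value = ascii_value.replace("+", " ")
--     ascii_value = "_".join(ascii_value.split())
--     return ascii_value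
-- ===== SOURCE B (Python) =====
-- import unicodedata
--
-- _SEPS = set("&/-,.\u00b7:;+")
--
-- def _normalize_industry_key(value: str) -> str:
--     # single pass: flush a token at each separator/whitespace boundary
--     normalized = unicodedata.normalize("NFKD", value)
--     tokens = []
--     cur = []
--     for c in normalized:
--         if unicodedata.combining(c):
--             continue
--         c = c.lower()
--         if c in _SEPS or c.isspace():
--             if cur:
--                 tokens.append("".join(cur))
--                 cur = []
--         else:
--             cur.append(c)
--     if cur:
--         tokens.append("".join(cur))
--     return "_".join(tokens)
-- ===== Notes on version B (the rewrite author's own statement) =====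
-- stated objective: alternative
-- what changed: Replaced the nine whole-string replace passes plus split/join with a single character-by-character scan that flushes tokens at separator/whitespace boundaries.
import Mathlib
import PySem

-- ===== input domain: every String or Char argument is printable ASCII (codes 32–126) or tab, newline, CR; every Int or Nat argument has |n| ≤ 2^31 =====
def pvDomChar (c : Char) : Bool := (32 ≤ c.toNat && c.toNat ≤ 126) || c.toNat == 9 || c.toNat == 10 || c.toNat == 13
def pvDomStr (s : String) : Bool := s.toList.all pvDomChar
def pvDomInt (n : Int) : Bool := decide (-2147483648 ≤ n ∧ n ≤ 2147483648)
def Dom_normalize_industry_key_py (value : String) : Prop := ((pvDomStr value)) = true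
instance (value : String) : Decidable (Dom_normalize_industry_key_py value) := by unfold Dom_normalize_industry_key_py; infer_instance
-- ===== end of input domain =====

-- B replaces A's nine whole-string replace passes + split()/join tail by a single
-- character scan that flushes tokens at separator/whitespace boundaries (alternative decomposition, same result).


-- unicodedata.normalize("NFKD", ·) is the identity on the stated domain (ASCII has no decompositions); exact there
def pyNFKD (cs : List Char) : List Char := cs
-- unicodedata.combining is 0 for every ASCII character; exact on the stated domain
def pyCombining (_c : Char) : Bool := false

-- ===== PORT A =====
def normalize_industry_key_py (value : String) : String :=
  let normalized := pyNFKD value.toList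
  let ascii := normalized.filter (fun c => !(pyCombining c))
  let ascii := PySem.Chars.lower ascii
  let ascii := (['&', '/', '-', ',', '.', '·', ':', ';'] : List Char).foldl
    (fun s ch => PySem.Chars.replace s [ch] [' ']) ascii
  let ascii := PySem.Chars.replace ascii ['+'] [' ']
  String.ofList (PySem.Chars.join ['_'] (PySem.Chars.split₀ ascii))

-- ===== PORT B =====
def sepChars : List Char := ['&', '/', '-', ',', '.', '·', ':', ';', '+']

def altStep (st : List (List Char) × List Char) (c : Char) : List (List Char) × List Char :=
  if pyCombining c then st
  else
    let c := PySem.Chars.lowerChar c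
    if sepChars.contains c || PySem.Chars.isspace c then
      if st.2.isEmpty then st else (st.1 ++ [st.2], [])
    else (st.1, st.2 ++ [c])

def normalize_industry_key_py_alt (value : String) : String :=
  let st := (pyNFKD value.toList).foldl altStep ([], [])
  let toks := if st.2.isEmpty then st.1 else st.1 ++ [st.2]
  String.ofList (PySem.Chars.join ['_'] toks)

-- ===== PRECONDITION & SPEC =====
def Spec_normalize_industry_key_py (value : String) (out : String) : Prop := out = normalize_industry_key_py_alt value
instance (value : String) (out : String) : Decidable (Spec_normalize_industry_key_py value out) := by unfold Spec_normalize_industry_key_py; infer_instance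

-- ===== CLAIM (what is proved, stated in full; the proofs are below) =====
def Claim_equal_normalize_industry_key_py : Prop := ∀ (value : String), Dom_normalize_industry_key_py value → Spec_normalize_industry_key_py value (normalize_industry_key_py value)

-- ===== LEMMAS AND PROOFS =====

lemma replace_go_single (a b : Char) (l acc : List Char) (fuel : Nat) (h : l.length ≤ fuel) :
    PySem.Chars.replace.go [a] [b] fuel l acc
      = acc.reverse ++ l.map (fun c => if c = a then b else c) := by
  induction l generalizing fuel acc with
  | nil =>
    cases fuel <;> simp [PySem.Chars.replace.go]
  | cons c t ih =>
    cases fuel with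
    | zero => simp at h
    | succ fuel =>
      rw [PySem.Chars.replace.go]
      by_cases hc : a = c
      · subst hc
        simp only [List.isPrefixOf, BEq.rfl, Bool.true_and, if_true]
        rw [show List.drop [a].length (a :: t) = t from rfl,
          ih _ _ (by simpa using Nat.le_of_succ_le_succ h)]
        simp
      · simp only [List.isPrefixOf, Bool.and_true]
        rw [if_neg (by simp [hc]), ih _ _ (by simpa using Nat.le_of_succ_le_succ h)]
        simp [Ne.symm hc]

lemma replace_single (a b : Char) (s : List Char) :
    PySem.Chars.replace s [a] [b] = s.map (fun c => if c = a then b else c) := by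
  rw [PySem.Chars.replace]
  simp [replace_go_single a b s [] s.length (le_refl _)]

def Fsub (S : List Char) (c : Char) : Char :=
  if S.contains (PySem.Chars.lowerChar c) then ' ' else PySem.Chars.lowerChar c
def gfun : Char -> Char := Fsub sepChars

lemma map_F_step (S : List Char) (a : Char) (cs : List Char) :
    (cs.map (Fsub S)).map (fun c => if c = a then ' ' else c) = cs.map (Fsub (S ++ [a])) := by
  rw [List.map_map]
  refine List.map_congr_left (fun c _ => ?_)
  simp only [Function.comp, Fsub, List.contains_eq_mem, List.mem_append, List.mem_cons,
    List.not_mem_nil, or_false, decide_eq_true_eq]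
  split_ifs <;> simp_all

lemma chain_maps (cs : List Char) :
    PySem.Chars.replace ((['&', '/', '-', ',', '.', '·', ':', ';'] : List Char).foldl
        (fun s ch => PySem.Chars.replace s [ch] [' ']) (PySem.Chars.lower cs)) ['+'] [' ']
      = cs.map gfun := by
  have h0 : PySem.Chars.lower cs = cs.map (Fsub []) := by
    refine List.map_congr_left (fun c _ => ?_)
    simp [Fsub]
  simp only [List.foldl_cons, List.foldl_nil, replace_single]
  rw [h0, map_F_step, map_F_step, map_F_step, map_F_step, map_F_step, map_F_step, map_F_step,
    map_F_step, map_F_step]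
  refine List.map_congr_left (fun c _ => ?_)
  simp [Fsub, gfun, sepChars]


lemma flush_iff (c : Char) :
    (sepChars.contains (PySem.Chars.lowerChar c) || PySem.Chars.isspace (PySem.Chars.lowerChar c))
      = PySem.Chars.isspace (gfun c) := by
  unfold gfun Fsub
  by_cases h : sepChars.contains (PySem.Chars.lowerChar c)
  · rw [if_pos h, h, Bool.true_or]
    rfl
  · rw [if_neg h, Bool.eq_false_iff.mpr h, Bool.false_or]

lemma gfun_of_not_space (c : Char) (h : PySem.Chars.isspace (gfun c) = false) :
    gfun c = PySem.Chars.lowerChar c := by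
  unfold gfun Fsub at *
  by_cases hs : sepChars.contains (PySem.Chars.lowerChar c)
  · rw [if_pos hs] at h; exact absurd h (by decide)
  · rw [if_neg hs]

lemma scan_eq_split (cs : List Char) (toks : List (List Char)) (cur : List Char) :
    (let st := cs.foldl altStep (toks, cur)
     if st.2.isEmpty then st.1 else st.1 ++ [st.2])
      = PySem.Chars.split₀.go (cs.map gfun) cur.reverse toks.reverse := by
  induction cs generalizing toks cur with
  | nil =>
    rw [List.map_nil, PySem.Chars.split₀.go]
    by_cases h : cur.isEmpty <;> simp_all
  | cons c cs ih =>
    simp only [List.map_cons, List.foldl_cons]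
    by_cases hf : PySem.Chars.isspace (gfun c) = true
    · have hcond : (sepChars.contains (PySem.Chars.lowerChar c)
          || PySem.Chars.isspace (PySem.Chars.lowerChar c)) = true := by
        rw [flush_iff]; exact hf
      by_cases hc : cur.isEmpty
      · have hstep : altStep (toks, cur) c = (toks, cur) := by
          simp only [altStep, pyCombining, Bool.false_eq_true, if_false, hcond, if_true, hc]
        rw [hstep, ih toks cur, PySem.Chars.split₀.go, if_pos hf,
          if_pos (by simpa using hc)]
        simp [List.isEmpty_iff.mp hc]
      · have hstep : altStep (toks, cur) c = (toks ++ [cur], []) := by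
          simp only [altStep, pyCombining, Bool.false_eq_true, if_false, hcond, if_true, hc]
        rw [hstep, ih (toks ++ [cur]) [], PySem.Chars.split₀.go, if_pos hf,
          if_neg (by simpa using hc)]
        simp
    · have hcond : (sepChars.contains (PySem.Chars.lowerChar c)
          || PySem.Chars.isspace (PySem.Chars.lowerChar c)) = false := by
        rw [flush_iff]; simpa using hf
      have hstep : altStep (toks, cur) c = (toks, cur ++ [PySem.Chars.lowerChar c]) := by
        simp only [altStep, pyCombining, Bool.false_eq_true, if_false, hcond]
      rw [hstep, ih toks (cur ++ [PySem.Chars.lowerChar c]), PySem.Chars.split₀.go,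
        if_neg hf, gfun_of_not_space c (by simpa using hf)]
      simp

-- ===== VERDICT (by name: the statement is the Claim_ definition above) =====
theorem normalize_industry_key_py_spec : Claim_equal_normalize_industry_key_py := by
  intro value _
  unfold Spec_normalize_industry_key_py normalize_industry_key_py normalize_industry_key_py_alt
  simp only [pyNFKD, pyCombining, Bool.not_false, List.filter_true]
  rw [chain_maps, PySem.Chars.split₀]
  have h := scan_eq_split value.toList [] []
  simp only [List.reverse_nil] at h
  rw [← h]
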